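-- pv_equiv track=rewrite | github.com/rida12b/Umbra | umbra/agents/surgeon.py | clean_mermaid_output
-- ===== SOURCE A (Python) =====
-- def clean_mermaid_output(raw: str) -> str:
--     """Remove markdown code fences, comments, and clean up the output."""
--     lines = raw.strip().split("\n")
--
--     # Remove markdown fences and invalid comments
--     cleaned_lines = []
--     for line in lines:
--         stripped = line.strip()
--         # Skip markdown fences
--         if stripped.startswith("```"):
--             continue
--         # Skip single % comments (invalid in Mermaid, should be %%)
--         if stripped.startswith("%") and not stripped.startswith("%%"):
--             continue
--         # Skip %% comments too for cleaner output
--         if stripped.startswith("%%"):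
--             continue
--         cleaned_lines.append(line)
--
--     result = "\n".join(cleaned_lines).strip()
--
--     # Ensure it starts with graph directive
--     if not result.startswith(("graph ", "flowchart ")):
--         # Try to find where the graph starts
--         for i, line in enumerate(result.split("\n")):
--             if line.strip().startswith(("graph ", "flowchart ")):
--                 result = "\n".join(result.split("\n")[i:])
--                 break
--
--     return result
-- ===== SOURCE B (Python) =====
-- def clean_mermaid_output(raw: str) -> str:
--     """Remove markdown code fences, comments, and clean up the output."""
--     kept = [ln for ln in raw.strip().split("\n")
--             if not ln.strip().startswith(("```", "%"))]
--     result = "\n".join(kept).strip()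
--     if result.startswith(("graph ", "flowchart ")):
--         return result
--     tail = result.split("\n")
--     while tail and not tail[0].strip().startswith(("graph ", "flowchart ")):
--         tail = tail[1:]
--     return "\n".join(tail) if tail else result
-- ===== Notes on version B (the rewrite author's own statement) =====
-- stated objective: simpler
-- what changed: Replaces the three-branch skip loop by a single filter comprehension with one merged startswith test, and the enumerate-index search plus repeated re-split slicing by a direct drop of non-directive leading lines from the result's line list.
import Mathlib
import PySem

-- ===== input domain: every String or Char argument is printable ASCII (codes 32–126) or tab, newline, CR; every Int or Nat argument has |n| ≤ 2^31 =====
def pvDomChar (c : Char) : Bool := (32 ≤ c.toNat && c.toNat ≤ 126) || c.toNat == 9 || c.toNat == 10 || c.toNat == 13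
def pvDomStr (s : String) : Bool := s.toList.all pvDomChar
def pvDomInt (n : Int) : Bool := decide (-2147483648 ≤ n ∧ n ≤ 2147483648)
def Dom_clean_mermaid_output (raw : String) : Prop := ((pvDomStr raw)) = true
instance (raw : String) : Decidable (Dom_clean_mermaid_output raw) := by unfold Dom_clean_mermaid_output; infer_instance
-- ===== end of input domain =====

-- B: same result via one filter with a merged fence/comment test and a direct drop of
-- leading non-directive lines, instead of A's three-branch skip loop and enumerate-index slicing.

-- s.split("\n") — sep "\n" is nonempty, so split? always returns a value
def pySplitNL (s : String) : List String := (PySem.Str.split? s "\n").getD []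

-- ===== PORT A =====
-- enumerate loop with break: first index whose stripped line starts with a directive
def aFindIdx (i : Nat) : List String → Option Nat
  | [] => none
  | line :: rest =>
    if PySem.Str.startswith (PySem.Str.strip line) "graph "
       || PySem.Str.startswith (PySem.Str.strip line) "flowchart "
    then some i else aFindIdx (i + 1) rest

def clean_mermaid_output (raw : String) : String :=
  let lines := pySplitNL (PySem.Str.strip raw)
  let cleaned_lines := lines.foldl (fun acc line =>
    let stripped := PySem.Str.strip line
    if PySem.Str.startswith stripped "```" then acc
    else if PySem.Str.startswith stripped "%" && !PySem.Str.startswith stripped "%%" then acc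
    else if PySem.Str.startswith stripped "%%" then acc
    else acc ++ [line]) []
  let result := PySem.Str.strip (PySem.Str.join "\n" cleaned_lines)
  if PySem.Str.startswith result "graph " || PySem.Str.startswith result "flowchart " then result
  else
    match aFindIdx 0 (pySplitNL result) with
    | some i => PySem.Str.join "\n" ((pySplitNL result).drop i)
    | none => result

-- ===== PORT B =====
def bSkip (ln : String) : Bool :=
  PySem.Str.startswith (PySem.Str.strip ln) "```"
  || PySem.Str.startswith (PySem.Str.strip ln) "%"

-- the while loop 'while tail and not directive(tail[0]): tail = tail[1:]'
def bDrop : List String → List String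
  | [] => []
  | l :: rest =>
    if PySem.Str.startswith (PySem.Str.strip l) "graph "
       || PySem.Str.startswith (PySem.Str.strip l) "flowchart "
    then l :: rest else bDrop rest

def clean_mermaid_output_alt (raw : String) : String :=
  let kept := (pySplitNL (PySem.Str.strip raw)).filter (fun ln => !(bSkip ln))
  let result := PySem.Str.strip (PySem.Str.join "\n" kept)
  if PySem.Str.startswith result "graph " || PySem.Str.startswith result "flowchart " then result
  else
    let tail := bDrop (pySplitNL result)
    if tail.isEmpty then result else PySem.Str.join "\n" tail

-- ===== PRECONDITION & SPEC =====
def Spec_clean_mermaid_output (raw : String) (out : String) : Prop := out = clean_mermaid_output_alt raw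
instance (raw : String) (out : String) : Decidable (Spec_clean_mermaid_output raw out) := by unfold Spec_clean_mermaid_output; infer_instance

-- ===== CLAIM (what is proved, stated in full; the proofs are below) =====
def Claim_equal_clean_mermaid_output : Prop := ∀ (raw : String), Dom_clean_mermaid_output raw → Spec_clean_mermaid_output raw (clean_mermaid_output raw)

-- ===== LEMMAS AND PROOFS =====

-- '%%' prefix implies '%' prefix
theorem startswith_pp (s : String) :
    PySem.Str.startswith s "%%" = true → PySem.Str.startswith s "%" = true := by
  simp only [PySem.Str.startswith_eq, PySem.Chars.startswith_iff]
  intro h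
  exact List.IsPrefix.trans (by decide) h

-- A's three skip branches collapse to one merged test (pure Bool shape)
theorem branch_bool {α : Type} (c1 c2 c3 : Bool) (h : c3 = true → c2 = true) (a b : α) :
    (if c1 then a else if c2 && !c3 then a else if c3 then a else b)
    = (if !(c1 || c2) then b else a) := by
  cases c1 <;> cases c2 <;> cases c3 <;> simp_all

def pDir (l : String) : Bool :=
  PySem.Str.startswith (PySem.Str.strip l) "graph "
  || PySem.Str.startswith (PySem.Str.strip l) "flowchart "

theorem fold_eq_filter (lines acc : List String) :
    lines.foldl (fun acc line =>
      let stripped := PySem.Str.strip line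
      if PySem.Str.startswith stripped "```" then acc
      else if PySem.Str.startswith stripped "%" && !PySem.Str.startswith stripped "%%" then acc
      else if PySem.Str.startswith stripped "%%" then acc
      else acc ++ [line]) acc
    = acc ++ lines.filter (fun ln => !(bSkip ln)) := by
  induction lines generalizing acc with
  | nil => simp
  | cons l rest ih =>
    rw [List.foldl_cons,
      show (let stripped := PySem.Str.strip l
        if PySem.Str.startswith stripped "```" then acc
        else if PySem.Str.startswith stripped "%" && !PySem.Str.startswith stripped "%%" then acc
        else if PySem.Str.startswith stripped "%%" then acc
        else acc ++ [l])
        = (if !(bSkip l) then acc ++ [l] else acc) from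
        branch_bool _ _ _ (startswith_pp _) acc (acc ++ [l]),
      List.filter_cons, ih]
    cases h : bSkip l with
    | true => simp
    | false => simp [List.append_assoc]

theorem bDrop_eq_drop (xs : List String) : bDrop xs = xs.drop (xs.findIdx pDir) := by
  induction xs with
  | nil => rfl
  | cons l rest ih =>
    rw [show bDrop (l :: rest) = (if pDir l then l :: rest else bDrop rest) from rfl,
      List.findIdx_cons]
    cases h : pDir l with
    | true => simp
    | false => rw [ih]; simp

theorem aFindIdx_eq (xs : List String) (k : Nat) :
    aFindIdx k xs = if xs.any pDir then some (k + xs.findIdx pDir) else none := by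
  induction xs generalizing k with
  | nil => rfl
  | cons l rest ih =>
    rw [show aFindIdx k (l :: rest) = (if pDir l then some k else aFindIdx (k + 1) rest) from rfl,
      List.any_cons, List.findIdx_cons]
    cases h : pDir l with
    | true => simp
    | false =>
      rw [ih]
      cases ha : rest.any pDir with
      | true => simp [Nat.add_comm, Nat.add_left_comm]
      | false => simp

-- phase 2: A's found-index slice equals B's dropped tail
theorem phase2_eq (xs : List String) (r : String) :
    (match aFindIdx 0 xs with
     | some i => PySem.Str.join "\n" (xs.drop i)
     | none => r)
    = (if (bDrop xs).isEmpty then r else PySem.Str.join "\n" (bDrop xs)) := by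
  rw [aFindIdx_eq, bDrop_eq_drop]
  cases h : xs.any pDir with
  | true =>
    obtain ⟨x, hx, hp⟩ := List.any_eq_true.mp h
    have hlt : xs.findIdx pDir < xs.length :=
      List.findIdx_lt_length_of_exists ⟨x, hx, by simpa using hp⟩
    have hne : xs.drop (xs.findIdx pDir) ≠ [] := by
      rw [Ne, List.drop_eq_nil_iff]
      omega
    simp [hne]
  | false =>
    have hlen : xs.findIdx pDir = xs.length := by
      rw [List.findIdx_eq_length]
      intro x hx
      have := List.any_eq_false.mp h x hx
      simpa using this
    rw [hlen]
    simp

-- ===== VERDICT (by name: the statement is the Claim_ definition above) =====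
theorem clean_mermaid_output_spec : Claim_equal_clean_mermaid_output := by
  intro raw _
  show clean_mermaid_output raw = clean_mermaid_output_alt raw
  rw [clean_mermaid_output, clean_mermaid_output_alt]
  simp only [fold_eq_filter, List.nil_append]
  generalize PySem.Str.strip (PySem.Str.join "\n"
    ((pySplitNL (PySem.Str.strip raw)).filter (fun ln => !(bSkip ln)))) = r
  cases hc : PySem.Str.startswith r "graph " || PySem.Str.startswith r "flowchart " with
  | true => simp
  | false =>
    simp only [Bool.false_eq_true, if_false]
    exact phase2_eq _ _
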